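-- pv_equiv track=rewrite | github.com/marisapug/Python_Tic-Tac-Toe | tictactoe.py | setup_board
-- ===== SOURCE A (Python) =====
-- def setup_board(n):
--     board = [[None] * n for i in range(n)]
--     count = 1
--     for i in range(n):
--         for j in range(n):
--             board[i][j] = count
--             count += 1
--     return board
-- ===== SOURCE B (Python) =====
-- def setup_board(n):
--     flat = range(1, n * n + 1)
--     return [list(flat[i * n:(i + 1) * n]) for i in range(n)]
-- ===== Notes on version B (the rewrite author's own statement) =====
-- stated objective: alternative
-- what changed: B builds the flat sequence 1..n*n in one pass with range() and then chunks it into rows by slicing, instead of A's pre-allocated None board filled cell by cell through nested loops with a cross-iteration count accumulator.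
import Mathlib
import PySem

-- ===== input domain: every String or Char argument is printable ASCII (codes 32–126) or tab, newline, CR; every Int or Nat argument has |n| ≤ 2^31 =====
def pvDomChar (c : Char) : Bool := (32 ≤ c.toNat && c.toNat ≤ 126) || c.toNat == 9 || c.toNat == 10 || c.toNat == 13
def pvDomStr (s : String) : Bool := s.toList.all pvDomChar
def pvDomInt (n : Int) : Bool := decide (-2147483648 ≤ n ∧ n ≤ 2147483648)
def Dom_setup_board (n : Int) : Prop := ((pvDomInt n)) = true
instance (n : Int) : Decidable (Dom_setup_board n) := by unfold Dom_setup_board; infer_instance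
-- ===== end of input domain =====

-- B builds the flat sequence 1..n*n once as a range and chunks it into rows by slicing, replacing
-- A's pre-filled mutable board and nested loops with a cross-iteration count accumulator (alternative; same cost).

-- ===== PORT A =====
-- Python rows are mutable arrays; a row is rendered as Array Int and `board[i][j] = count`
-- (in-place mutation of row i) as threading row i through the inner fold and writing it back.
-- [None] placeholders are represented by 0 : Int; every cell is overwritten before the board
-- is returned, so the placeholder value is never observable.
def setup_board (n : Int) : List (List Int) :=
  let board : List (Array Int) :=
    (PySem.List.pyRange 0 n 1).map (fun _ => (PySem.List.pyRepeat [(0 : Int)] n).toArray)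
  (((PySem.List.pyRange 0 n 1).foldl
      (fun st i =>
        let r := (PySem.List.pyRange 0 n 1).foldl
          (fun st2 j => (st2.1.setIfInBounds j.toNat st2.2, st2.2 + 1))
          (st.1.getD i.toNat #[], st.2)
        (st.1.set i.toNat r.1, r.2))
      (board, 1)).1).map Array.toList

-- ===== PORT B =====
-- Python's `flat` is a lazy range object; slicing a range yields a new range computed
-- arithmetically from the clamped bounds (CPython semantics), which list() materialises.
-- pvRangeSliceList is exactly that: (range lo hi)[a:b] for step 1.
def pvRangeSliceList (lo hi a b : Int) : List Int :=
  PySem.List.pyRange (lo + (PySem.List.clampIdx (hi - lo).toNat a : ℕ))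
    (lo + (PySem.List.clampIdx (hi - lo).toNat b : ℕ)) 1

def setup_board_alt (n : Int) : List (List Int) :=
  (PySem.List.pyRange 0 n 1).map (fun i =>
    pvRangeSliceList 1 (n * n + 1) (i * n) ((i + 1) * n))

-- ===== PRECONDITION & SPEC =====
def Spec_setup_board (n : Int) (out : List (List Int)) : Prop := out = setup_board_alt n
instance (n : Int) (out : List (List Int)) : Decidable (Spec_setup_board n out) := by unfold Spec_setup_board; infer_instance

-- ===== CLAIM (what is proved, stated in full; the proofs are below) =====
def Claim_equal_setup_board : Prop := ∀ (n : Int), Dom_setup_board n → Spec_setup_board n (setup_board n)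

-- ===== LEMMAS AND PROOFS =====

-- The inner-loop body of A's port, with the index already converted to a natural.
def pvInnerRow (st : Array Int × Int) (k : ℕ) : Array Int × Int :=
  (st.1.setIfInBounds k st.2, st.2 + 1)

-- One outer-loop iteration of A's port (the whole inner loop over row i).
def pvOuterA (m : ℕ) (st : List (Array Int) × Int) (i : ℕ) : List (Array Int) × Int :=
  let r := (List.range m).foldl pvInnerRow (st.1.getD i #[], st.2)
  (st.1.set i r.1, r.2)

-- A row after the first m cells have been overwritten with c, c+1, …
def pvRowUpd (r : List Int) (c : Int) : ℕ → List Int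
  | 0 => r
  | m + 1 => (pvRowUpd r c m).set m (c + m)

theorem pvInnerRow_fold (m : ℕ) (r : Array Int) (c : Int) :
    ((List.range m).foldl pvInnerRow (r, c)).1.toList = pvRowUpd r.toList c m ∧
    ((List.range m).foldl pvInnerRow (r, c)).2 = c + m := by
  induction m with
  | zero => simp [pvRowUpd]
  | succ m ih =>
      obtain ⟨h1, h2⟩ := ih
      rw [List.range_succ, List.foldl_append, List.foldl_cons, List.foldl_nil]
      constructor
      · rw [pvRowUpd]
        simp only [pvInnerRow, Array.toList_setIfInBounds, h1, h2]
      · simp only [pvInnerRow, h2]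
        push_cast; ring

theorem pvRowUpd_eq (m : ℕ) (r : List Int) (c : Int) (h : m ≤ r.length) :
    pvRowUpd r c m = (List.range m).map (fun k : ℕ => c + (k : Int)) ++ r.drop m := by
  induction m with
  | zero => simp [pvRowUpd]
  | succ m ih =>
      have hm : m < r.length := h
      rw [pvRowUpd, ih (by omega), List.range_succ, List.map_append,
        List.drop_eq_getElem_cons hm, List.set_append]
      simp only [List.length_map, List.length_range, lt_irrefl, Nat.sub_self,
        List.set_cons_zero, List.append_assoc]
      simp

theorem pvOuterA_fold (m : ℕ) (I : ℕ) (hI : I ≤ m) :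
    (List.range I).foldl (pvOuterA m)
        ((List.range m).map (fun _ => (List.replicate m (0 : Int)).toArray), 1)
      = ((List.range m).map (fun r =>
            (if r < I then (List.range m).map (fun k : ℕ => ((r : Int) * m + 1) + (k : Int))
             else List.replicate m (0 : Int)).toArray),
          (I : Int) * m + 1) := by
  induction I with
  | zero => simp
  | succ I ih =>
      rw [List.range_succ, List.foldl_append, ih (by omega)]
      simp only [List.foldl_cons, List.foldl_nil, pvOuterA]
      have hIm : I < m := hI
      have hlen : I < ((List.range m).map (fun r =>
          (if r < I then (List.range m).map (fun k : ℕ => ((r : Int) * m + 1) + (k : Int))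
           else List.replicate m (0 : Int)).toArray)).length := by simpa using hIm
      rw [List.getD_eq_getElem _ _ hlen, List.getElem_map, List.getElem_range,
        if_neg (lt_irrefl I)]
      obtain ⟨h1, h2⟩ := pvInnerRow_fold m (List.replicate m (0 : Int)).toArray ((I : Int) * m + 1)
      have hrow : ((List.range m).foldl pvInnerRow
            ((List.replicate m (0 : Int)).toArray, (I : Int) * m + 1)).1
          = ((List.range m).map (fun k : ℕ => (((I : Int)) * m + 1) + (k : Int))).toArray := by
        have h3 : ((List.range m).foldl pvInnerRow
              ((List.replicate m (0 : Int)).toArray, (I : Int) * m + 1)).1.toList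
            = (List.range m).map (fun k : ℕ => (((I : Int)) * m + 1) + (k : Int)) := by
          rw [h1, List.toList_toArray, pvRowUpd_eq m _ _ (by simp)]
          simp [List.drop_replicate]
        calc ((List.range m).foldl pvInnerRow
              ((List.replicate m (0 : Int)).toArray, (I : Int) * m + 1)).1
            = (((List.range m).foldl pvInnerRow
              ((List.replicate m (0 : Int)).toArray, (I : Int) * m + 1)).1.toList).toArray := by
                rw [Array.toArray_toList]
          _ = _ := by rw [h3]
      rw [hrow, h2]
      simp only [Prod.mk.injEq]
      constructor
      · apply List.ext_getElem (by simp)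
        intro r hr1 hr2
        simp only [List.length_set, List.length_map, List.length_range] at hr1
        by_cases hrI : r = I
        · subst hrI
          rw [List.getElem_set_self, List.getElem_map, List.getElem_range, if_pos (by omega)]
        · rw [List.getElem_set_ne (by omega), List.getElem_map, List.getElem_range,
            List.getElem_map, List.getElem_range]
          by_cases hr3 : r < I
          · rw [if_pos hr3, if_pos (by omega)]
          · rw [if_neg hr3, if_neg (by omega)]
      · push_cast; ring

-- B's row r is the arithmetic slice (range 1 (m*m+1))[r*m:(r+1)*m]; it equals the arithmetic row.
theorem pvSlice_row (m r : ℕ) (hr : r < m) :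
    pvRangeSliceList 1 ((m : Int) * m + 1) ((r : Int) * m) (((r : Int) + 1) * m)
      = (List.range m).map (fun k : ℕ => ((r : Int) * m + 1) + (k : Int)) := by
  unfold pvRangeSliceList
  have hlen : ((m : Int) * m + 1 - 1).toNat = m * m := by
    have h1 : ((m : Int) * m + 1 - 1) = ((m * m : ℕ) : Int) := by push_cast; ring
    rw [h1, Int.toNat_natCast]
  have ha : ((r : Int) * m) = ((r * m : ℕ) : Int) := by push_cast; ring
  have hb : (((r : Int) + 1) * m) = ((r * m + m : ℕ) : Int) := by push_cast; ring
  rw [hlen, ha, hb, PySem.List.clampIdx_natCast, PySem.List.clampIdx_natCast]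
  have hle1 : r * m ≤ m * m := Nat.mul_le_mul_right m (le_of_lt hr)
  have hle2 : r * m + m ≤ m * m := by
    have h5 : (r + 1) * m ≤ m * m := Nat.mul_le_mul_right m hr
    calc r * m + m = (r + 1) * m := by ring
      _ ≤ m * m := h5
  rw [min_eq_left hle1, min_eq_left hle2, PySem.List.pyRange_one]
  have hsub : ((1 + ((r * m + m : ℕ) : Int)) - (1 + ((r * m : ℕ) : Int))).toNat = m := by
    rw [show (1 + ((r * m + m : ℕ) : Int)) - (1 + ((r * m : ℕ) : Int)) = ((m : ℕ) : Int) by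
      push_cast; ring, Int.toNat_natCast]
  rw [hsub]
  apply List.map_congr_left
  intro k _
  push_cast; ring

-- ===== VERDICT (by name: the statement is the Claim_ definition above) =====
theorem setup_board_spec : Claim_equal_setup_board := by
  intro n _
  unfold Spec_setup_board setup_board setup_board_alt
  by_cases h : n ≤ 0
  · rw [PySem.List.pyRange_one_eq_nil h]
    simp
  · rw [not_le] at h
    obtain ⟨m, rfl⟩ : ∃ m : ℕ, n = ↑m := ⟨n.toNat, (Int.toNat_of_nonneg h.le).symm⟩
    rw [PySem.List.pyRange_zero_nat]
    simp only [List.foldl_map, List.map_map, Function.comp_def,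
      PySem.List.pyRepeat_singleton, Int.toNat_natCast]
    have hfun : (fun (st : List (Array Int) × Int) (k : ℕ) =>
        let r := (List.range m).foldl
          (fun st2 k2 => (st2.1.setIfInBounds k2 st2.2, st2.2 + 1)) (st.1.getD k #[], st.2)
        (st.1.set k r.1, r.2))
        = pvOuterA m := by
      funext st k
      rfl
    rw [hfun, pvOuterA_fold m m le_rfl]
    simp only [List.map_map, Function.comp_def]
    apply List.map_congr_left
    intro r hr
    rw [List.mem_range] at hr
    rw [if_pos hr]
    exact (pvSlice_row m r hr).symm
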